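-- pv_equiv track=rewrite | github.com/ESSS/alfasim-sdk | src/alfasim_sdk/result_reader/aggregator.py | map_output_key_to_time_set_key
-- ===== SOURCE A (Python) =====
-- from collections import defaultdict, namedtuple
--
-- OutputKeyType = str
--
-- TimeStepIndex = int
--
-- TimeSetKeyType = tuple[TimeStepIndex, ...]
--
-- def map_output_key_to_time_set_key(
--     all_metadata: dict[int, dict],
-- ) -> dict[OutputKeyType, TimeSetKeyType]:
--     """
--     Operates on the complete metadata mapping "output key"s to they  respective "time set key".
--
--     :param all_metadata:
--         A dict mapping base time steps to output metadata.
--     """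
--     output_key_dict = defaultdict[OutputKeyType, set[TimeStepIndex]](set)
--     for base_ts, metadata in all_metadata.items():
--         for output_id, meta in metadata.items():
--             time_set_key = output_key_dict[output_id]
--             time_set_key.add(base_ts)
--     return {k: tuple(sorted(v)) for k, v in output_key_dict.items()}
-- ===== SOURCE B (Python) =====
-- def map_output_key_to_time_set_key(all_metadata):
--     keys = dict.fromkeys(k for md in all_metadata.values() for k in md)
--     return {
--         k: tuple(sorted(ts for ts, md in all_metadata.items() if k in md))
--         for k in keys
--     }
-- ===== Notes on version B (the rewrite author's own statement) =====
-- stated objective: simpler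
-- what changed: Instead of accumulating a set of time steps per output key and sorting each set at the end, B computes the ordered distinct key list once with dict.fromkeys and builds each key's tuple directly as the sorted base time steps whose metadata contains that key; no sets are maintained.
import Mathlib
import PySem

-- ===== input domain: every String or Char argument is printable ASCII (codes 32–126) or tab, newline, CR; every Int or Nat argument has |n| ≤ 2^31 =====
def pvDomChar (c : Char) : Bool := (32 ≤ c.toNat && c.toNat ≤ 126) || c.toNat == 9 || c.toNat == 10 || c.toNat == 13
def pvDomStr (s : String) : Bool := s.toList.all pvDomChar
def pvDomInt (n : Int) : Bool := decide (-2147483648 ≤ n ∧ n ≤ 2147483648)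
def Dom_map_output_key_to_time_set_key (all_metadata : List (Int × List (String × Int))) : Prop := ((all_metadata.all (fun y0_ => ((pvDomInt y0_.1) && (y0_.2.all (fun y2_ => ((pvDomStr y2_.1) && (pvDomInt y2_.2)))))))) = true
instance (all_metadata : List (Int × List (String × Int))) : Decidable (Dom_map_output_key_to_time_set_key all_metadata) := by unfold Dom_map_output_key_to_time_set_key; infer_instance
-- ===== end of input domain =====

-- B replaces A's per-key set accumulation by one dict.fromkeys pass plus a per-key sorted
-- comprehension over the items (objective: simpler decomposition).

-- ===== PORT A =====
def map_output_key_to_time_set_key (all_metadata : List (Int × List (String × Int))) : List (String × List Int) :=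
  let output_key_dict : PySem.Dict String (PySem.Set Int) :=
    all_metadata.foldl (fun d p =>
      p.2.foldl (fun d q =>
        -- defaultdict[...](set): output_key_dict[output_id] inserts set() if missing, then .add(base_ts)
        d.insert q.1 (PySem.Set.add (d.getD q.1 PySem.Set.empty) p.1)) d)
      PySem.Dict.empty
  output_key_dict.items.map (fun kv => (kv.1, PySem.List.sorted kv.2 (fun x => x) false))

-- ===== PORT B =====
def map_output_key_to_time_set_key_alt (all_metadata : List (Int × List (String × Int))) : List (String × List Int) :=
  -- keys = dict.fromkeys(k for md in all_metadata.values() for k in md)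
  let keys := PySem.List.dedup (all_metadata.flatMap (fun p => p.2.map Prod.fst))
  keys.map (fun k =>
    (k, PySem.List.sorted
          (all_metadata.filterMap (fun p => if (p.2.map Prod.fst).contains k then some p.1 else none))
          (fun x => x) false))

-- ===== PRECONDITION & SPEC =====
-- Pre_ excludes association lists whose outer (base time step) keys repeat: such a list does not
-- represent a Python dict, which is A's declared input type.
def Pre_map_output_key_to_time_set_key (all_metadata : List (Int × List (String × Int))) : Prop :=
  (all_metadata.map Prod.fst).Nodup
instance (all_metadata : List (Int × List (String × Int))) : Decidable (Pre_map_output_key_to_time_set_key all_metadata) := by unfold Pre_map_output_key_to_time_set_key; infer_instance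

def pvWitness_map_output_key_to_time_set_key : (List (Int × List (String × Int))) :=
  [(3, [("a", 1), ("b", 2)]), (1, [("a", 0)])]

def Spec_map_output_key_to_time_set_key (all_metadata : List (Int × List (String × Int))) (out : List (String × List Int)) : Prop := out = map_output_key_to_time_set_key_alt all_metadata
instance (all_metadata : List (Int × List (String × Int))) (out : List (String × List Int)) : Decidable (Spec_map_output_key_to_time_set_key all_metadata out) := by unfold Spec_map_output_key_to_time_set_key; infer_instance

-- ===== CLAIM (what is proved, stated in full; the proofs are below) =====
def Claim_equal_map_output_key_to_time_set_key : Prop := ∀ (all_metadata : List (Int × List (String × Int))), Dom_map_output_key_to_time_set_key all_metadata → Pre_map_output_key_to_time_set_key all_metadata → Spec_map_output_key_to_time_set_key all_metadata (map_output_key_to_time_set_key all_metadata)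

-- ===== LEMMAS AND PROOFS =====

-- the inner loop of A (one metadata dict, base time step t)
def pvInner (t : Int) (l : List (String × Int)) (d : PySem.Dict String (PySem.Set Int)) :
    PySem.Dict String (PySem.Set Int) :=
  l.foldl (fun d q => d.insert q.1 (PySem.Set.add (d.getD q.1 PySem.Set.empty) t)) d

lemma pvInner_getD (t : Int) (l : List (String × Int)) (d : PySem.Dict String (PySem.Set Int))
    (k : String) :
    (pvInner t l d).getD k PySem.Set.empty =
      if k ∈ l.map Prod.fst then PySem.Set.add (d.getD k PySem.Set.empty) t
      else d.getD k PySem.Set.empty := by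
  induction l generalizing d with
  | nil => simp [pvInner]
  | cons q l ih =>
    simp only [pvInner, List.foldl_cons] at *
    rw [ih]
    simp only [PySem.Dict.getD_insert, List.map_cons, List.mem_cons]
    by_cases hk : k = q.1
    · by_cases hm : k ∈ l.map Prod.fst <;> simp [hk]
    · by_cases hm : k ∈ l.map Prod.fst <;> simp [hk, hm]

lemma pvInner_keys (t : Int) (l : List (String × Int)) (d : PySem.Dict String (PySem.Set Int)) :
    (pvInner t l d).keys = PySem.Set.update d.keys (l.map Prod.fst) := by
  simpa [pvInner] using PySem.Dict.keys_foldl_insert_key l Prod.fst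
    (fun d q => PySem.Set.add (d.getD q.1 PySem.Set.empty) t) d

-- the matched base time steps of key k, in input order
def pvMatched (am : List (Int × List (String × Int))) (k : String) : List Int :=
  am.filterMap (fun p => if (p.2.map Prod.fst).contains k then some p.1 else none)

lemma pvOuter_getD (am : List (Int × List (String × Int)))
    (d : PySem.Dict String (PySem.Set Int)) (k : String)
    (hnd : (am.map Prod.fst).Nodup)
    (hfresh : ∀ t ∈ am.map Prod.fst, t ∉ d.getD k PySem.Set.empty) :
    (am.foldl (fun d p => pvInner p.1 p.2 d) d).getD k PySem.Set.empty =
      d.getD k PySem.Set.empty ++ pvMatched am k := by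
  induction am generalizing d with
  | nil => simp [pvMatched]
  | cons p am ih =>
    simp only [List.map_cons, List.nodup_cons] at hnd
    have hp1 : p.1 ∉ d.getD k PySem.Set.empty := hfresh p.1 (by simp)
    have hstep : (pvInner p.1 p.2 d).getD k PySem.Set.empty =
        d.getD k PySem.Set.empty ++ (if (p.2.map Prod.fst).contains k then [p.1] else []) := by
      rw [pvInner_getD]
      by_cases hm : k ∈ p.2.map Prod.fst
      · simp [hm, PySem.Set.add]
        exact hp1
      · simp [hm]
    rw [List.foldl_cons, ih]
    · rw [hstep]
      simp only [pvMatched, List.filterMap_cons]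
      cases hc : (p.2.map Prod.fst).contains k <;> simp
    · exact hnd.2
    · intro t ht
      rw [hstep]
      simp only [List.mem_append]
      rintro (h | h)
      · exact hfresh t (by simp [ht]) h
      · split_ifs at h <;> simp_all
      
lemma pvOuter_keys (am : List (Int × List (String × Int)))
    (d : PySem.Dict String (PySem.Set Int)) :
    (am.foldl (fun d p => pvInner p.1 p.2 d) d).keys =
      PySem.Set.update d.keys (am.flatMap (fun p => p.2.map Prod.fst)) := by
  induction am generalizing d with
  | nil => simp [PySem.Set.update]
  | cons p am ih =>
    rw [List.foldl_cons, ih, pvInner_keys, List.flatMap_cons, PySem.Set.update,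
      PySem.Set.update, PySem.Set.update, List.foldl_append]

-- ===== VERDICT (by name: the statement is the Claim_ definition above) =====
theorem map_output_key_to_time_set_key_spec : Claim_equal_map_output_key_to_time_set_key := by
  intro am _ hpre
  unfold Spec_map_output_key_to_time_set_key map_output_key_to_time_set_key
    map_output_key_to_time_set_key_alt
  simp only
  have hfold : (am.foldl (fun d p => p.2.foldl
      (fun d q => d.insert q.1 (PySem.Set.add (d.getD q.1 PySem.Set.empty) p.1)) d)
      PySem.Dict.empty) = am.foldl (fun d p => pvInner p.1 p.2 d) PySem.Dict.empty := rfl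
  rw [hfold]
  set D := am.foldl (fun d p => pvInner p.1 p.2 d) PySem.Dict.empty with hD
  have hkeys : D.keys = PySem.List.dedup (am.flatMap (fun p => p.2.map Prod.fst)) := by
    rw [hD, pvOuter_keys, PySem.Dict.keys_empty, PySem.Set.update_nil_left,
      PySem.List.dedup_eq_ofList]
  have hndk : D.keys.Nodup := by
    rw [hkeys, PySem.List.dedup_eq_ofList]; exact PySem.Set.nodup_ofList _
  have hget : ∀ k, D.getD k PySem.Set.empty = pvMatched am k := by
    intro k
    rw [hD, pvOuter_getD am PySem.Dict.empty k hpre (by simp [PySem.Dict.getD_empty, PySem.Set.empty])]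
    simp [PySem.Dict.getD_empty, PySem.Set.empty]
  rw [PySem.Dict.items_eq_map_keys D hndk PySem.Set.empty, hkeys, List.map_map]
  refine List.map_congr_left ?_
  intro k _
  simp only [Function.comp_apply]
  rw [hget k]
  simp [pvMatched]
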